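-- pv_equiv track=rewrite | github.com/jdmansour/gen-crawler-ui | scraper/build_site_tree.py | dedup_breadcrumbs
-- ===== SOURCE A (Python) =====
-- def normalize_url(url: str) -> str:
--     """Strip trailing slash for consistent keying."""
--     return url.rstrip("/")
--
-- def dedup_breadcrumbs(breadcrumbs: list[dict]) -> list[dict]:
--     """Deduplicate breadcrumbs by normalized URL, preserving original order.
--
--     Keeps the last occurrence of each URL (for better labels).
--     """
--     if not breadcrumbs:
--         return breadcrumbs
--     # Walk backwards so the last occurrence wins, then reverse to restore order
--     seen: dict[str, dict] = {}
--     for crumb in reversed(breadcrumbs):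
--         key = normalize_url(crumb["url"])
--         if key not in seen:
--             seen[key] = crumb
--     # Return in original order (first occurrence position of each unique URL)
--     result = []
--     seen_keys: set[str] = set()
--     for crumb in breadcrumbs:
--         key = normalize_url(crumb["url"])
--         if key not in seen_keys:
--             seen_keys.add(key)
--             result.append(seen[key])  # use the last-occurrence's data (better label)
--     return result
-- ===== SOURCE B (Python) =====
-- def normalize_url(url: str) -> str:
--     """Strip trailing slash for consistent keying."""
--     return url.rstrip("/")
--
-- def dedup_breadcrumbs(breadcrumbs: list[dict]) -> list[dict]:
--     """Deduplicate breadcrumbs by normalized URL, preserving original order.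
--
--     Keeps the last occurrence of each URL (for better labels).
--     """
--     if not breadcrumbs:
--         return breadcrumbs
--     # One forward pass: dict keys keep their first-insertion position,
--     # while reassignment overwrites the value, so we get first-occurrence
--     # order with last-occurrence data.
--     d = {}
--     for crumb in breadcrumbs:
--         d[normalize_url(crumb["url"])] = crumb
--     return list(d.values())
-- ===== Notes on version B (the rewrite author's own statement) =====
-- stated objective: simpler
-- what changed: Replaces A's two passes (a backward pass building a last-occurrence dict plus a forward pass with an auxiliary seen-set) by one forward pass over one dict, relying on Python dicts keeping a key's first-insertion position while reassignment overwrites the value.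
import Mathlib
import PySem

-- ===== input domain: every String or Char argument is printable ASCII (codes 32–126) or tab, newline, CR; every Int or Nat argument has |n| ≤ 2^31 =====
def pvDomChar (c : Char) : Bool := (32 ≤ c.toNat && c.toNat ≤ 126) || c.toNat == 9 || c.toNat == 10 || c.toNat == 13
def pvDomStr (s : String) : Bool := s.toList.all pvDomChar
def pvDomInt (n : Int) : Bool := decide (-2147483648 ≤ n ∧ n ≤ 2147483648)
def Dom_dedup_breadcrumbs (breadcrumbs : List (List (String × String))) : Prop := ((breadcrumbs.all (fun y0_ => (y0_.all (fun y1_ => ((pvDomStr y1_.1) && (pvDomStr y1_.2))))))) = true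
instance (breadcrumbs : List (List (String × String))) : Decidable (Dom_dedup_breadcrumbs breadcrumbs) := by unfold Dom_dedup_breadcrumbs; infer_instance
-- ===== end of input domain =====

-- B replaces A's backward dict pass + forward set pass by one forward pass over a
-- single dict (first-insertion position, last-assignment value): simpler, same O(n).


-- ===== PORT A =====
-- str.rstrip("/") has no PySem primitive (stripChars strips both ends); hand port,
-- exact: drop the trailing run of '/' characters.
def normalize_url (url : String) : String :=
  String.ofList ((url.toList.reverse.dropWhile (fun c => c == '/')).reverse)

-- crumb["url"] : first match in the association list (the dict convention);
-- total form used under Pre_ (Python raises KeyError when "url" is absent).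
def keyOf (crumb : List (String × String)) : String :=
  normalize_url ((crumb.lookup "url").getD "")

def dedup_breadcrumbs (breadcrumbs : List (List (String × String))) : List (List (String × String)) :=
  if breadcrumbs = [] then breadcrumbs
  else
    let seen : PySem.Dict String (List (String × String)) :=
      breadcrumbs.reverse.foldl
        (fun s crumb =>
          let key := keyOf crumb
          if s.contains key then s else s.insert key crumb)
        PySem.Dict.empty
    let fin := breadcrumbs.foldl
      (fun (acc : List (List (String × String)) × PySem.Set String) crumb =>
        let key := keyOf crumb
        if PySem.Set.contains acc.2 key then acc
        else (acc.1 ++ [seen.getD key crumb], PySem.Set.add acc.2 key))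
      ([], PySem.Set.empty)
    fin.1

-- ===== PORT B =====
def dedup_breadcrumbs_alt (breadcrumbs : List (List (String × String))) : List (List (String × String)) :=
  if breadcrumbs = [] then breadcrumbs
  else
    (breadcrumbs.foldl
      (fun (d : PySem.Dict String (List (String × String))) crumb =>
        d.insert (keyOf crumb) crumb)
      PySem.Dict.empty).values

-- ===== PRECONDITION & SPEC =====
-- Pre_ excludes exactly the crumbs without an "url" key, on which both Pythons raise KeyError.
def Pre_dedup_breadcrumbs (breadcrumbs : List (List (String × String))) : Prop :=
  ∀ crumb ∈ breadcrumbs, (crumb.lookup "url").isSome = true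
instance (breadcrumbs : List (List (String × String))) : Decidable (Pre_dedup_breadcrumbs breadcrumbs) := by unfold Pre_dedup_breadcrumbs; infer_instance

def pvWitness_dedup_breadcrumbs : (List (List (String × String))) :=
  [[("url", "a/"), ("label", "Home")], [("url", "b")], [("url", "a"), ("label", "Better")]]

def Spec_dedup_breadcrumbs (breadcrumbs : List (List (String × String))) (out : List (List (String × String))) : Prop := out = dedup_breadcrumbs_alt breadcrumbs
instance (breadcrumbs : List (List (String × String))) (out : List (List (String × String))) : Decidable (Spec_dedup_breadcrumbs breadcrumbs out) := by unfold Spec_dedup_breadcrumbs; infer_instance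

-- ===== CLAIM (what is proved, stated in full; the proofs are below) =====
def Claim_equal_dedup_breadcrumbs : Prop := ∀ (breadcrumbs : List (List (String × String))), Dom_dedup_breadcrumbs breadcrumbs → Pre_dedup_breadcrumbs breadcrumbs → Spec_dedup_breadcrumbs breadcrumbs (dedup_breadcrumbs breadcrumbs)



-- ===== LEMMAS AND PROOFS =====

-- the two fold steps, named for the proofs (defeq to the lambdas in the ports)
def insB (d : PySem.Dict String (List (String × String))) (crumb : List (String × String)) :
    PySem.Dict String (List (String × String)) :=
  d.insert (keyOf crumb) crumb

def insA (s : PySem.Dict String (List (String × String))) (crumb : List (String × String)) :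
    PySem.Dict String (List (String × String)) :=
  if s.contains (keyOf crumb) then s else s.insert (keyOf crumb) crumb

-- B's dict: lookup = last matching crumb (first match in the reversed list)
theorem get?_foldl_insB (l : List (List (String × String)))
    (d : PySem.Dict String (List (String × String))) (q : String) :
    (l.foldl insB d).get? q =
      (l.reverse.find? (fun c => keyOf c == q)).or (d.get? q) := by
  induction l generalizing d with
  | nil => simp
  | cons c cs ih =>
    simp only [List.foldl_cons, List.reverse_cons, List.find?_append, ih, Option.or_assoc]
    congr 1
    by_cases h : q = keyOf c
    · have hb : (keyOf c == q) = true := by simp [h]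
      simp [insB, h, PySem.Dict.get?_insert_self]
    · have hb : (keyOf c == q) = false := by simpa using fun e => h e.symm
      simp [insB, PySem.Dict.get?_insert, h, hb]

-- A's seen dict: lookup = the value of s, else the first matching crumb of l
theorem get?_foldl_insA (l : List (List (String × String)))
    (s : PySem.Dict String (List (String × String))) (q : String) :
    (l.foldl insA s).get? q =
      (s.get? q).or (l.find? (fun c => keyOf c == q)) := by
  induction l generalizing s with
  | nil => simp
  | cons c cs ih =>
    simp only [List.foldl_cons, ih, List.find?_cons]
    by_cases hq : q = keyOf c
    · have hb : (keyOf c == q) = true := by simp [hq]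
      rw [hb]
      by_cases hc : s.contains (keyOf c) = true
      · have hsome : (s.get? q).isSome = true := by
          rw [← PySem.Dict.contains_eq_isSome_get?, hq]; exact hc
        obtain ⟨v, hv⟩ := Option.isSome_iff_exists.mp hsome
        simp [insA, hc, hv]
      · have hc' : s.contains (keyOf c) = false := by simpa using hc
        have hnone : s.get? (keyOf c) = none := by
          have h2 := PySem.Dict.contains_eq_isSome_get? (d := s) (k := keyOf c)
          rw [hc'] at h2
          simpa using h2.symm
        have hnone' : s.get? q = none := by rw [hq, hnone]
        simp [insA, hc', hnone, PySem.Dict.get?_insert_self, hq]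
    · have hb : (keyOf c == q) = false := by simpa using fun e => hq e.symm
      rw [hb]
      by_cases hc : s.contains (keyOf c) = true
      · simp [insA, hc]
      · have hc' : s.contains (keyOf c) = false := by simpa using hc
        simp [insA, hc', PySem.Dict.get?_insert, hq]

-- hence the two dicts agree on every lookup
theorem get?_seen_eq_get?_insB (bs : List (List (String × String))) (q : String) :
    (bs.reverse.foldl insA PySem.Dict.empty).get? q =
      (bs.foldl insB PySem.Dict.empty).get? q := by
  rw [get?_foldl_insA, get?_foldl_insB]
  simp

theorem getD_seen_eq (bs : List (List (String × String))) (q : String)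
    (dflt : List (String × String)) :
    (bs.reverse.foldl insA PySem.Dict.empty).getD q dflt =
      (bs.foldl insB PySem.Dict.empty).getD q dflt := by
  rw [PySem.Dict.getD_eq_get?_getD, PySem.Dict.getD_eq_get?_getD, get?_seen_eq_get?_insB]

theorem getD_congr_of_contains (d : PySem.Dict String (List (String × String))) (k : String)
    (h : d.contains k = true) (a b : List (String × String)) :
    d.getD k a = d.getD k b := by
  rw [PySem.Dict.contains_eq_isSome_get?] at h
  obtain ⟨v, hv⟩ := Option.isSome_iff_exists.mp h
  rw [PySem.Dict.getD_eq_get?_getD, PySem.Dict.getD_eq_get?_getD, hv]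
  simp

-- the not-yet-seen keys of l relative to the set s, in order of first occurrence
def newKeys : List (List (String × String)) → PySem.Set String → List String
  | [], _ => []
  | c :: cs, s =>
    if keyOf c ∈ s then newKeys cs s
    else keyOf c :: newKeys cs (PySem.Set.add s (keyOf c))

theorem update_eq_append_newKeys (l : List (List (String × String))) (s : PySem.Set String) :
    PySem.Set.update s (l.map keyOf) = s ++ newKeys l s := by
  induction l generalizing s with
  | nil => simp [PySem.Set.update, newKeys]
  | cons c cs ih =>
    by_cases h : keyOf c ∈ s
    · have hadd : PySem.Set.add s (keyOf c) = s := by simp [PySem.Set.add, h]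
      calc PySem.Set.update s ((c :: cs).map keyOf)
          = PySem.Set.update (PySem.Set.add s (keyOf c)) (cs.map keyOf) := rfl
        _ = s ++ newKeys cs s := by rw [hadd, ih]
        _ = s ++ newKeys (c :: cs) s := by rw [newKeys, if_pos h]
    · have hadd : PySem.Set.add s (keyOf c) = s ++ [keyOf c] := by simp [PySem.Set.add, h]
      calc PySem.Set.update s ((c :: cs).map keyOf)
          = PySem.Set.update (PySem.Set.add s (keyOf c)) (cs.map keyOf) := rfl
        _ = (s ++ [keyOf c]) ++ newKeys cs (s ++ [keyOf c]) := by rw [hadd, ih]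
        _ = s ++ newKeys (c :: cs) s := by
            rw [newKeys, if_neg h, hadd]
            simp [List.append_assoc]

theorem ofList_map_eq_newKeys (bs : List (List (String × String))) :
    PySem.Set.ofList (bs.map keyOf) = newKeys bs PySem.Set.empty := by
  have h := update_eq_append_newKeys bs PySem.Set.empty
  rw [PySem.Set.ofList_eq_foldl]
  exact h.trans (List.nil_append _)

-- A's second loop, characterised
theorem foldl_stepA (seen : PySem.Dict String (List (String × String)))
    (l : List (List (String × String))) (r : List (List (String × String)))
    (s : PySem.Set String)
    (hc : ∀ c ∈ l, seen.contains (keyOf c) = true) :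
    (l.foldl
      (fun (acc : List (List (String × String)) × PySem.Set String) crumb =>
        if PySem.Set.contains acc.2 (keyOf crumb) then acc
        else (acc.1 ++ [seen.getD (keyOf crumb) crumb], PySem.Set.add acc.2 (keyOf crumb)))
      (r, s)).1 = r ++ (newKeys l s).map (fun q => seen.getD q []) := by
  induction l generalizing r s with
  | nil => simp [newKeys]
  | cons c cs ih =>
    by_cases h : keyOf c ∈ s
    · have hcond : PySem.Set.contains s (keyOf c) = true := by simp [h]
      rw [List.foldl_cons]
      rw [show (if PySem.Set.contains (r, s).2 (keyOf c) then (r, s)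
            else ((r, s).1 ++ [seen.getD (keyOf c) c], PySem.Set.add (r, s).2 (keyOf c))) = (r, s)
          from by rw [hcond]; simp]
      rw [ih r s (fun c hm => hc c (List.mem_cons_of_mem _ hm))]
      rw [newKeys, if_pos h]
    · have hcond : PySem.Set.contains s (keyOf c) = false := by simp [h]
      have hcon := hc c (List.mem_cons_self ..)
      have hgd : seen.getD (keyOf c) c = seen.getD (keyOf c) [] :=
        getD_congr_of_contains seen (keyOf c) hcon c []
      rw [List.foldl_cons]
      rw [show (if PySem.Set.contains (r, s).2 (keyOf c) then (r, s)
            else ((r, s).1 ++ [seen.getD (keyOf c) c], PySem.Set.add (r, s).2 (keyOf c))) =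
            (r ++ [seen.getD (keyOf c) c], PySem.Set.add s (keyOf c))
          from by rw [hcond]; simp]
      rw [ih (r ++ [seen.getD (keyOf c) c]) (PySem.Set.add s (keyOf c))
        (fun c hm => hc c (List.mem_cons_of_mem _ hm))]
      rw [newKeys, if_neg h]
      simp [hgd, List.append_assoc]

theorem contains_seen (bs : List (List (String × String))) (c : List (String × String))
    (hm : c ∈ bs) :
    (bs.reverse.foldl insA PySem.Dict.empty).contains (keyOf c) = true := by
  rw [PySem.Dict.contains_eq_isSome_get?, get?_foldl_insA]
  have hex : ∃ x ∈ bs.reverse, (keyOf x == keyOf c) = true :=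
    ⟨c, by simpa using hm, by simp⟩
  simp [List.find?_isSome.mpr hex]

-- ===== VERDICT (by name: the statement is the Claim_ definition above) =====
theorem dedup_breadcrumbs_spec : Claim_equal_dedup_breadcrumbs := by
  intro bs _ _
  unfold Spec_dedup_breadcrumbs
  by_cases hbs : bs = []
  · simp [hbs, dedup_breadcrumbs, dedup_breadcrumbs_alt]
  · have hA : dedup_breadcrumbs bs =
        (newKeys bs PySem.Set.empty).map
          (fun q => (bs.reverse.foldl insA PySem.Dict.empty).getD q []) := by
      unfold dedup_breadcrumbs
      rw [if_neg hbs]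
      exact (foldl_stepA (bs.reverse.foldl insA PySem.Dict.empty) bs [] PySem.Set.empty
        (fun c hm => contains_seen bs c hm)).trans (List.nil_append _)
    have hnd : (bs.foldl insB PySem.Dict.empty).keys.Nodup := by
      have h := PySem.Dict.nodup_keys_foldl_insert_key bs keyOf
        (fun _ c => c) PySem.Dict.empty (by simp)
      simpa [insB] using h
    have hkeys : (bs.foldl insB PySem.Dict.empty).keys = newKeys bs PySem.Set.empty := by
      have h := PySem.Dict.keys_foldl_insert_key bs keyOf (fun _ c => c) PySem.Dict.empty
      rw [← ofList_map_eq_newKeys, PySem.Set.ofList_eq_foldl]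
      simpa [insB, PySem.Set.update] using h
    have hB : dedup_breadcrumbs_alt bs =
        (newKeys bs PySem.Set.empty).map
          (fun q => (bs.foldl insB PySem.Dict.empty).getD q []) := by
      unfold dedup_breadcrumbs_alt
      rw [if_neg hbs]
      exact (PySem.Dict.values_eq_map_keys (bs.foldl insB PySem.Dict.empty) hnd []).trans
        (by rw [hkeys])
    rw [hA, hB]
    exact List.map_congr_left (fun q _ => getD_seen_eq bs q [])
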